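-- pv_equiv track=rewrite | github.com/tigowler/coding_test_study | Programmers/Hash/완주하지_못한_선수.py | solution
-- ===== SOURCE A (Python) =====
-- def solution(participant, completion):
--     p_dict = {p: 0 for p in participant}
--     for p in participant:
--         p_dict[p] += 1
--
--     for c in completion:
--         p_dict[c] -= 1
--
--     for key, value in p_dict.items():
--         if value != 0:
--             return key
-- ===== SOURCE B (Python) =====
-- def solution(participant, completion):
--     # Sort both lists and merge them recursively run by run: each group of equal
--     # finishers is located on the sorted roster (list.index raises for a finisher
--     # who never enrolled), run lengths are compared, and every roster name whose
--     # multiplicity differs is collected; the answer is the first collected name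
--     # in the roster's original order.
--     def unmatched(sp, sc):
--         # sp, sc sorted; the names of sp whose multiplicities in sp and sc differ
--         if not sc:
--             return list(sp)
--         name = sc[0]
--         b = 0
--         while b < len(sc) and sc[b] == name:
--             b += 1
--         k = sp.index(name)
--         a = k
--         while a < len(sp) and sp[a] == name:
--             a += 1
--         head = sp[:k] + ([name] if a - k != b else [])
--         return head + unmatched(sp[a:], sc[b:])
--
--     mismatched = unmatched(sorted(participant), sorted(completion))
--     for p in participant:
--         if p in mismatched:
--             return p
-- ===== Notes on version B (the rewrite author's own statement) =====
-- stated objective: alternative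
-- what changed: A keeps a name->balance dictionary (increment per participant, decrement per completion, then scans the table's items for a nonzero); B keeps no table: it sorts both lists and merges them recursively run by run (each group of equal finishers is located on the sorted roster with list.index and its run length compared), collecting the names whose multiplicities differ and returning the first of them in roster order.
-- outside the precondition, e.g. on solution(['a', 'b', 'a'], ['a', 'b', 'a']): A returns None, B returns None; on solution(['a'], ['a']): A returns None, B returns None
import Mathlib
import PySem

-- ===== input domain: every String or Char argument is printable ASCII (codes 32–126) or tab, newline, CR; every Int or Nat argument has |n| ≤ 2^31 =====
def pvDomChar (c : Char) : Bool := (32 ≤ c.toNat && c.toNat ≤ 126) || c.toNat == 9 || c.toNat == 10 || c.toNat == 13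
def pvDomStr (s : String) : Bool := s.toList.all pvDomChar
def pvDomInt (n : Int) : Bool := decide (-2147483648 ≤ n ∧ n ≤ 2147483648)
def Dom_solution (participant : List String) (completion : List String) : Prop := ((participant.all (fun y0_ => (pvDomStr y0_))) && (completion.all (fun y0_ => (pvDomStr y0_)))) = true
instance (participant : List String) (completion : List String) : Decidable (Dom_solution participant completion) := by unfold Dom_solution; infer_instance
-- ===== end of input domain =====

-- B replaces A's net-balance dictionary (increment/decrement/scan items) with a sort of both lists
-- and a recursive run-by-run merge (groups of equal finishers are located on the sorted roster with
-- list.index and run lengths compared); alternative algorithm, no counting table; not claimed faster.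


-- ===== PORT A =====
def solution (participant : List String) (completion : List String) : String :=
  -- p_dict = {p: 0 for p in participant}
  let d0 : PySem.Dict String Int := participant.foldl (fun d p => d.insert p 0) PySem.Dict.empty
  -- for p in participant: p_dict[p] += 1   (every p is a key of d0, so modify is exact here)
  let d1 := participant.foldl (fun d p => d.modify p 0 (· + 1)) d0
  -- for c in completion: p_dict[c] -= 1    (KeyError when c is not a key → none; excluded by Pre_)
  let d2? := completion.foldl
    (fun d? c => d?.bind (fun d => if d.contains c then some (d.modify c 0 (· - 1)) else none))
    (some d1)
  match d2? with
  | none => ""       -- Python raises KeyError here: outside Pre_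
  | some d2 =>
    -- for key, value in p_dict.items(): if value != 0: return key
    match d2.items.find? (fun kv => !(kv.2 == 0)) with
    | some kv => kv.1
    | none => ""     -- Python falls off the end returning None (not a str): outside Pre_

-- ===== PORT B =====
-- both inner while loops:  counts the leading run of `name` (stops at the first other element)
def runLen (name : String) : List String → Nat
  | [] => 0
  | x :: xs => if x == name then runLen name xs + 1 else 0

-- def unmatched(sp, sc): recursive run-by-run merge of the two sorted lists
-- (sp.index(name) raises ValueError when a finisher never enrolled → none)
def unmatchedB (sp sc : List String) : Option (List String) :=
  match sc with
  | [] => some sp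
  | name :: rest =>
    let b := runLen name (name :: rest)
    match PySem.List.index? sp name with
    | none => none       -- ValueError: outside Pre_
    | some k =>
      let a := k + runLen name (sp.drop k)   -- a = k; while a < len(sp) and sp[a] == name: a += 1
      let head := PySem.List.slice sp none (some (k : Int)) ++ (if a - k ≠ b then [name] else [])
      (unmatchedB (PySem.List.slice sp (some (a : Int)) none)
                  (PySem.List.slice (name :: rest) (some (b : Int)) none)).map (head ++ ·)
termination_by sc.length
decreasing_by
  simp only [PySem.List.slice_from_natCast, List.length_drop, runLen, beq_self_eq_true, if_true,
    List.length_cons]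
  omega

def solution_alt (participant : List String) (completion : List String) : String :=
  -- mismatched = unmatched(sorted(participant), sorted(completion))
  match unmatchedB (PySem.List.sorted participant (fun x => x) false)
                   (PySem.List.sorted completion (fun x => x) false) with
  | none => ""         -- Python raises ValueError here: outside Pre_
  | some mismatched =>
    -- for p in participant: if p in mismatched: return p
    match participant.find? (fun p => mismatched.contains p) with
    | some p => p
    | none => ""       -- Python falls off the end returning None (not a str): outside Pre_

-- ===== PRECONDITION & SPEC =====
-- Pre_ excludes (a) inputs where A raises KeyError (a finisher absent from the roster) and
-- (b) inputs where every name's counts match, on which A returns None, not a str.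
def Pre_solution (participant : List String) (completion : List String) : Prop :=
  (∀ c ∈ completion, c ∈ participant) ∧
  (∃ s ∈ participant, participant.count s ≠ completion.count s)
instance (participant : List String) (completion : List String) : Decidable (Pre_solution participant completion) := by unfold Pre_solution; infer_instance

def pvWitness_solution : List String × List String :=
  (["mislav", "stanko", "mislav", "ana"], ["stanko", "ana", "mislav"])

def Spec_solution (participant : List String) (completion : List String) (out : String) : Prop := out = solution_alt participant completion
instance (participant : List String) (completion : List String) (out : String) : Decidable (Spec_solution participant completion out) := by unfold Spec_solution; infer_instance

-- ===== CLAIM (what is proved, stated in full; the proofs are below) =====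
def Claim_equal_solution : Prop := ∀ (participant : List String) (completion : List String), Dom_solution participant completion → Pre_solution participant completion → Spec_solution participant completion (solution participant completion)

-- ===== LEMMAS AND PROOFS =====

-- ---- A-side lemmas ----

-- the zero-initialised roster dict stores only zeros
lemma getD_foldl_insert_zero (l : List String) (d : PySem.Dict String Int) (v : String)
    (h : d.getD v 0 = 0) :
    (l.foldl (fun d p => d.insert p 0) d).getD v 0 = 0 := by
  induction l generalizing d with
  | nil => simpa using h
  | cons a t ih =>
    simp only [List.foldl_cons]
    exact ih _ (by rw [PySem.Dict.getD_insert]; split <;> simp [h])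

-- A's decrement loop subtracts the completion count
lemma getD_foldl_modify_sub (l : List String) (d : PySem.Dict String Int) (v : String) :
    (l.foldl (fun d c => d.modify c 0 (· - 1)) d).getD v 0 = d.getD v 0 - l.count v := by
  induction l generalizing d with
  | nil => simp
  | cons a t ih =>
    simp only [List.foldl_cons, ih, PySem.Dict.getD_modify, List.count_cons]
    split <;> rename_i h
    · subst h; simp; ring
    · have : ¬ (a = v) := fun hh => h hh.symm
      simp [this]

-- updating a set with elements it already has leaves it unchanged
lemma set_update_of_subset (xs s : List String) (h : ∀ x ∈ xs, x ∈ s) :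
    PySem.Set.update s xs = s := by
  induction xs generalizing s with
  | nil => rfl
  | cons a t ih =>
    have ha : a ∈ s := h a (by simp)
    have : PySem.Set.add s a = s := by
      simp [PySem.Set.add, PySem.Set.contains, ha]
    calc PySem.Set.update s (a :: t) = PySem.Set.update (PySem.Set.add s a) t := rfl
      _ = s := by rw [this]; exact ih s (fun x hx => h x (by simp [hx]))

-- a KeyError-guarded modify loop succeeds when every key is present
lemma foldOpt_eq (f : Int → Int) (l : List String) (d : PySem.Dict String Int)
    (h : ∀ c ∈ l, d.contains c = true) :
    l.foldl (fun d? c => d?.bind (fun d => if d.contains c then some (d.modify c 0 f) else none)) (some d)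
      = some (l.foldl (fun d c => d.modify c 0 f) d) := by
  induction l generalizing d with
  | nil => rfl
  | cons a t ih =>
    have ha := h a (by simp)
    simp only [List.foldl_cons, Option.bind_some, ha, if_pos]
    exact ih _ (fun c hc => by
      rw [PySem.Dict.contains_modify]
      simp [h c (by simp [hc])])

-- find? only looks at the predicate's values on the list
lemma find?_congr_mem (l : List String) (f g : String → Bool)
    (h : ∀ a ∈ l, f a = g a) : l.find? f = l.find? g := by
  induction l with
  | nil => rfl
  | cons a t ih =>
    have ha := h a (by simp)
    rw [List.find?_cons, List.find?_cons, ha, ih (fun x hx => h x (by simp [hx]))]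

-- folding Set.add over a list only appends elements
lemma foldl_add_append : ∀ (t : List String) (s : PySem.Set String),
    ∃ r, t.foldl PySem.Set.add s = s ++ r := by
  intro t
  induction t with
  | nil => exact fun s => ⟨[], by simp⟩
  | cons b u ihu =>
    intro s
    obtain ⟨r, hr⟩ := ihu (PySem.Set.add s b)
    by_cases hb : b ∈ s
    · have hadd : PySem.Set.add s b = s := by simp [PySem.Set.add, PySem.Set.contains, hb]
      exact ⟨r, by rw [List.foldl_cons, hr, hadd]⟩
    · have hadd : PySem.Set.add s b = s ++ [b] := by simp [PySem.Set.add, PySem.Set.contains, hb]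
      exact ⟨b :: r, by rw [List.foldl_cons, hr, hadd]; simp⟩

-- searching the set-of (ordered dedup) of a list = searching the list, when the seed's elements all fail
lemma find?_foldl_add (pred : String → Bool) :
    ∀ (l : List String) (s : PySem.Set String), (∀ x ∈ s, pred x = false) →
    (l.foldl PySem.Set.add s).find? pred = l.find? pred := by
  intro l
  induction l with
  | nil =>
    intro s hs
    simp only [List.foldl_nil, List.find?_nil]
    exact List.find?_eq_none.mpr (fun x hx => by simp [hs x hx])
  | cons a t ih =>
    intro s hs
    rw [List.foldl_cons]
    by_cases hpa : pred a = true
    · have hmem : a ∉ s := fun h => by simp [hs a h] at hpa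
      have hadd : PySem.Set.add s a = s ++ [a] := by
        simp [PySem.Set.add, PySem.Set.contains, hmem]
      obtain ⟨r, hr⟩ := foldl_add_append t (PySem.Set.add s a)
      rw [hr, hadd, List.append_assoc, List.find?_append]
      have hnone : s.find? pred = none := List.find?_eq_none.mpr (fun x hx => by simp [hs x hx])
      simp [hnone, hpa]
    · have hpa' : pred a = false := by simpa using hpa
      rw [ih (PySem.Set.add s a) (fun x hx => by
        rcases (PySem.Set.mem_add s a x).mp hx with h | h
        · exact hs x h
        · subst h; exact hpa')]
      simp [hpa']

-- A reduces to the first roster name (first-occurrence order) whose two counts differ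
lemma solution_eq_find (participant completion : List String)
    (hsub : ∀ c ∈ completion, c ∈ participant) :
    solution participant completion
      = match participant.find? (fun p => !(participant.count p == completion.count p)) with
        | some k => k
        | none => "" := by
  simp only [solution]
  set d0 : PySem.Dict String Int := participant.foldl (fun d p => d.insert p 0) PySem.Dict.empty with hd0
  set d1 := participant.foldl (fun d p => d.modify p 0 (· + 1)) d0 with hd1
  have hkeys0 : d0.keys = PySem.Set.ofList participant := by
    rw [hd0, PySem.Dict.keys_foldl_insert (f := fun _ _ => (0 : Int))]
    simp [PySem.Dict.keys_empty, PySem.Set.ofList_eq_foldl, PySem.Set.update]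
  have hget0 : ∀ k, d0.getD k 0 = 0 := fun k =>
    getD_foldl_insert_zero _ _ _ (by simp [PySem.Dict.getD_empty])
  have hkeys1 : d1.keys = PySem.Set.ofList participant := by
    rw [hd1, PySem.Dict.keys_foldl_modify (f := fun _ _ v => v + 1), hkeys0]
    exact set_update_of_subset _ _ (fun y hy => (PySem.Set.mem_ofList _ _).mpr hy)
  have hcont1 : ∀ c ∈ completion, d1.contains c = true := by
    intro c hc
    have : c ∈ d1.keys := by rw [hkeys1]; exact (PySem.Set.mem_ofList _ _).mpr (hsub c hc)
    exact (PySem.Dict.contains_iff_mem_keys _ _).mpr this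
  set d2 := completion.foldl (fun d c => d.modify c 0 (· - 1)) d1 with hd2
  rw [foldOpt_eq _ completion d1 hcont1]
  show (match d2.items.find? (fun kv => !(kv.2 == 0)) with
        | some kv => kv.1
        | none => "") = _
  have hkeys2 : d2.keys = PySem.Set.ofList participant := by
    rw [hd2, PySem.Dict.keys_foldl_modify (f := fun _ _ v => v - 1), hkeys1]
    exact set_update_of_subset _ _ (fun y hy => (PySem.Set.mem_ofList _ _).mpr (hsub y hy))
  have hget2 : ∀ k, d2.getD k 0 = (participant.count k : Int) - completion.count k := by
    intro k
    rw [hd2, getD_foldl_modify_sub, hd1, PySem.Dict.getD_foldl_modify_add_one, hget0]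
    ring
  have hitems : d2.items = (PySem.Set.ofList participant).map (fun k => (k, d2.getD k 0)) := by
    rw [← hkeys2]
    exact PySem.Dict.items_eq_map_keys d2 (hkeys2 ▸ PySem.Set.nodup_ofList participant) 0
  rw [hitems, List.find?_map]
  have hpredA : ∀ k ∈ PySem.Set.ofList participant,
      ((fun kv => !(kv.2 == 0)) ∘ (fun k => (k, d2.getD k 0))) k
        = (fun p => !(participant.count p == completion.count p)) k := by
    intro k _
    simp only [Function.comp_apply, hget2 k]
    by_cases h : participant.count k = completion.count k <;> simp [h, sub_eq_zero]
  rw [find?_congr_mem _ _ _ hpredA]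
  rw [PySem.Set.ofList_eq_foldl participant,
    find?_foldl_add _ participant ([] : PySem.Set String) (fun x hx => by cases hx)]
  cases participant.find? (fun p => !(participant.count p == completion.count p)) with
  | none => rfl
  | some k => rfl

-- ---- B-side lemmas ----

-- in a sorted list whose elements are all ≥ name, the leading run of name carries
-- every occurrence of name: runLen is its count and dropping it filters name out
lemma runLen_split (name : String) (l : List String)
    (hs : l.Pairwise (· ≤ ·)) (hmin : ∀ y ∈ l, name ≤ y) :
    runLen name l = l.count name ∧
    l.drop (runLen name l) = l.filter (fun x => !(x == name)) := by
  induction l with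
  | nil => simp [runLen]
  | cons x xs ih =>
    rcases List.pairwise_cons.mp hs with ⟨hx, hxs⟩
    by_cases hxe : x = name
    · subst hxe
      obtain ⟨h1, h2⟩ := ih hxs (fun y hy => hmin y (by simp [hy]))
      refine ⟨?_, ?_⟩
      · simp [runLen, h1]
      · simp [runLen, h2]
    · have hlt : name < x := lt_of_le_of_ne (hmin x (by simp)) (fun h => hxe h.symm)
      have hnot : name ∉ xs := fun h => absurd (hx name h) (not_le.mpr hlt)
      have hxb : (x == name) = false := by simp [hxe]
      have hrl : runLen name (x :: xs) = 0 := by simp [runLen, hxb]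
      refine ⟨?_, ?_⟩
      · rw [hrl, List.count_cons, List.count_eq_zero.mpr hnot]
        simp [hxb]
      · rw [hrl, List.drop_zero]
        symm
        apply List.filter_eq_self.mpr
        intro y hy
        rcases List.mem_cons.mp hy with h | h
        · subst h; simp [hxe]
        · have hne : name < y := lt_of_lt_of_le hlt (hx y h)
          simp [hne.ne']

-- list.index finds the length of the maximal ≠-prefix
lemma index?_eq_takeWhile_length (c : String) (sp : List String) (h : c ∈ sp) :
    PySem.List.index? sp c = some ((sp.takeWhile (fun x => !(x == c))).length) := by
  induction sp with
  | nil => cases h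
  | cons a tl ih =>
    by_cases ha : a = c
    · subst ha
      rw [PySem.List.index?_cons_self]
      simp
    · have hmem : c ∈ tl := by
        rcases List.mem_cons.mp h with h' | h'
        · exact absurd h'.symm ha
        · exact h'
      rw [PySem.List.index?_cons_of_ne tl ha, ih hmem]
      simp [ha]

-- the recursive run-by-run merge succeeds when every finisher enrolled and returns
-- exactly the roster names whose multiplicities differ
lemma unmatchedB_spec (n : Nat) : ∀ (sp sc : List String), sc.length ≤ n →
    sp.Pairwise (· ≤ ·) → sc.Pairwise (· ≤ ·) → (∀ y ∈ sc, y ∈ sp) →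
    ∃ R, unmatchedB sp sc = some R ∧ ∀ x, (x ∈ R ↔ sp.count x ≠ sc.count x) := by
  induction n with
  | zero =>
    intro sp sc hlen _ _ _
    have hsc : sc = [] := List.length_eq_zero_iff.mp (Nat.le_zero.mp hlen)
    subst hsc
    exact ⟨sp, by rw [unmatchedB], fun x => by
        rw [List.count_nil]
        constructor
        · intro hx h0
          exact absurd (List.count_eq_zero.mp h0) (by simpa using hx)
        · intro hne
          by_contra hx
          exact hne (List.count_eq_zero.mpr (by simpa using hx))⟩
  | succ n ih =>
    intro sp sc hlen hsp hsc hsub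
    match sc with
    | [] =>
      exact ⟨sp, by rw [unmatchedB], fun x => by
        rw [List.count_nil]
        constructor
        · intro hx h0
          exact absurd (List.count_eq_zero.mp h0) (by simpa using hx)
        · intro hne
          by_contra hx
          exact hne (List.count_eq_zero.mpr (by simpa using hx))⟩
    | c :: rest =>
      have hminC : ∀ y ∈ c :: rest, c ≤ y := by
        intro y hy
        rcases List.mem_cons.mp hy with h | h
        · subst h; exact le_refl _
        · exact (List.pairwise_cons.mp hsc).1 y h
      have hc : c ∈ sp := hsub c (by simp)
      set T := sp.takeWhile (fun x => !(x == c)) with hT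
      set D := sp.dropWhile (fun x => !(x == c)) with hD
      have hTD : sp = T ++ D := (List.takeWhile_append_dropWhile).symm
      have hDne : D ≠ [] := by
        intro h0
        have : c ∈ T := by rw [hTD] at hc; simpa [h0] using hc
        have := List.mem_takeWhile_imp this
        simp at this
      have hDsorted : D.Pairwise (· ≤ ·) := hsp.sublist (List.dropWhile_sublist _)
      obtain ⟨d, D', hDeq⟩ := List.exists_cons_of_ne_nil hDne
      have hdc : d = c := by
        have h2 : List.dropWhile (fun x => !(x == c)) sp = d :: D' := by rw [← hD, hDeq]
        have h1 := List.head_dropWhile_not (p := fun x => !(x == c)) (l := sp) (by rw [h2]; simp)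
        simp [h2] at h1
        exact h1
      have hcD : c ∈ D := by rw [hDeq, hdc]; exact List.mem_cons_self
      have hminD : ∀ y ∈ D, c ≤ y := by
        intro y hy
        rw [hDeq] at hy
        rcases List.mem_cons.mp hy with h | h
        · rw [h, hdc]
        · exact hdc ▸ (List.pairwise_cons.mp (hDeq ▸ hDsorted)).1 y h
      have hTlt : ∀ y ∈ T, y < c := by
        intro y hy
        have hp := List.mem_takeWhile_imp hy
        have hyc : y ≠ c := by simpa using hp
        have hle : y ≤ c := (List.pairwise_append.mp (hTD ▸ hsp)).2.2 y hy c hcD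
        exact lt_of_le_of_ne hle hyc
      have hTc : T.count c = 0 := List.count_eq_zero.mpr (fun h => absurd (hTlt c h) (lt_irrefl c))
      obtain ⟨hb, hdb⟩ := runLen_split c (c :: rest) hsc hminC
      obtain ⟨ha, hda⟩ := runLen_split c D hDsorted hminD
      have hdropT : sp.drop T.length = D := by rw [hTD, List.drop_left]
      have htakeT : sp.take T.length = T := by rw [hTD, List.take_left]
      -- unfold one step of the port
      have hidx := index?_eq_takeWhile_length c sp hc
      have hdropA : sp.drop (T.length + runLen c D) = D.filter (fun x => !(x == c)) := by
        rw [← hda, ← List.drop_drop, hdropT]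
      have hstep : unmatchedB sp (c :: rest)
          = (unmatchedB (D.filter (fun x => !(x == c))) ((c :: rest).filter (fun x => !(x == c)))).map
              ((T ++ (if runLen c D ≠ runLen c (c :: rest) then [c] else [])) ++ ·) := by
        rw [unmatchedB]
        rw [hidx]
        simp only [PySem.List.slice_from_natCast, PySem.List.slice_to_natCast, ← hT,
          htakeT, hdropT, Nat.add_sub_cancel_left, hdropA, hdb]
      have hlen' : ((c :: rest).filter (fun x => !(x == c))).length ≤ n := by
        have h1 : 1 ≤ runLen c (c :: rest) := by simp [runLen]
        have := congrArg List.length hdb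
        rw [List.length_drop] at this
        simp only [List.length_cons] at hlen this ⊢
        omega
      have hsub' : ∀ y ∈ (c :: rest).filter (fun x => !(x == c)), y ∈ D.filter (fun x => !(x == c)) := by
        intro y hy
        rcases List.mem_filter.mp hy with ⟨hy1, hy2⟩
        have hysp : y ∈ sp := hsub y hy1
        have hyD : y ∈ D := by
          rw [hTD] at hysp
          rcases List.mem_append.mp hysp with h | h
          · exact absurd (hminC y hy1) (not_le.mpr (hTlt y h))
          · exact h
        exact List.mem_filter.mpr ⟨hyD, hy2⟩
      obtain ⟨R', hR', hmemR'⟩ := ih (D.filter (fun x => !(x == c))) ((c :: rest).filter (fun x => !(x == c)))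
        hlen' (hDsorted.sublist List.filter_sublist) (hsc.sublist List.filter_sublist) hsub'
      refine ⟨(T ++ (if runLen c D ≠ runLen c (c :: rest) then [c] else [])) ++ R', by rw [hstep, hR']; simp, ?_⟩
      intro x
      have hcountsp : sp.count x = T.count x + D.count x := by rw [hTD, List.count_append]
      by_cases hxc : x = c
      · subst hxc
        have hxT : x ∉ T := fun h => absurd (hTlt x h) (lt_irrefl x)
        have hxR' : x ∉ R' := by
          intro h
          have := (hmemR' x).mp h
          have e1 : (D.filter (fun y => !(y == x))).count x = 0 :=
            List.count_eq_zero.mpr (fun hm => by simpa using (List.mem_filter.mp hm).2)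
          have e2 : (((x :: rest)).filter (fun y => !(y == x))).count x = 0 :=
            List.count_eq_zero.mpr (fun hm => by simpa using (List.mem_filter.mp hm).2)
          rw [e1, e2] at this
          exact this rfl
        have hcnt : sp.count x = D.count x := by rw [hcountsp, hTc]; omega
        by_cases hne : runLen x D ≠ runLen x (x :: rest)
        · rw [if_pos hne]
          rw [ha, hb] at hne
          simp only [List.mem_append, List.mem_singleton, hxT, hxR', or_false, false_or]
          rw [hcnt]
          simpa using hne
        · rw [if_neg hne]
          rw [not_not, ha, hb] at hne
          simp only [List.append_nil, List.mem_append, hxT, hxR', or_self, false_iff, not_not]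
          rw [hcnt, hne]
      · have hxite : x ∉ (if runLen c D ≠ runLen c (c :: rest) then [c] else []) := by
          split <;> simp [hxc]
        have hfiltD : (D.filter (fun y => !(y == c))).count x = D.count x :=
          List.count_filter (by simp [hxc])
        have hfiltC : ((c :: rest).filter (fun y => !(y == c))).count x = (c :: rest).count x :=
          List.count_filter (by simp [hxc])
        by_cases hxT : x ∈ T
        · have hxlt : x < c := hTlt x hxT
          have hsc0 : (c :: rest).count x = 0 :=
            List.count_eq_zero.mpr (fun h => absurd (hminC x h) (not_le.mpr hxlt))
          have hsp1 : 1 ≤ sp.count x := List.one_le_count_iff.mpr (by rw [hTD]; exact List.mem_append.mpr (Or.inl hxT))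
          simp only [List.mem_append, hxT, true_or, true_iff, hsc0]
          omega
        · have hTx : T.count x = 0 := List.count_eq_zero.mpr hxT
          have hcnt : sp.count x = D.count x := by rw [hcountsp, hTx]; omega
          simp only [List.mem_append, hxT, hxite, false_or]
          rw [hmemR' x, hfiltD, hfiltC, hcnt]

-- B reduces to the same first-occurrence search
lemma solution_alt_eq_find (participant completion : List String)
    (hsub : ∀ c ∈ completion, c ∈ participant) :
    solution_alt participant completion
      = match participant.find? (fun p => !(participant.count p == completion.count p)) with
        | some k => k
        | none => "" := by
  have hspP := PySem.List.sorted_pairwise participant (fun x => x) (κ := String)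
  have hspC := PySem.List.sorted_pairwise completion (fun x => x) (κ := String)
  have hpermP := PySem.List.sorted_perm participant (fun x => x) false
  have hpermC := PySem.List.sorted_perm completion (fun x => x) false
  have hsub' : ∀ y ∈ PySem.List.sorted completion (fun x => x) false,
      y ∈ PySem.List.sorted participant (fun x => x) false := by
    intro y hy
    exact (hpermP.mem_iff).mpr (hsub y ((hpermC.mem_iff).mp hy))
  obtain ⟨R, hR, hmemR⟩ := unmatchedB_spec (PySem.List.sorted completion (fun x => x) false).length
    (PySem.List.sorted participant (fun x => x) false)
    (PySem.List.sorted completion (fun x => x) false)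
    (le_refl _) hspP hspC hsub'
  simp only [solution_alt, hR]
  have hpred : ∀ p ∈ participant,
      (R.contains p) = (fun p => !(participant.count p == completion.count p)) p := by
    intro p _
    rw [List.contains_eq_mem]
    by_cases h : participant.count p = completion.count p
    · have : p ∉ R := by
        rw [hmemR p, hpermP.count_eq, hpermC.count_eq]
        simp [h]
      simp [this, h]
    · have : p ∈ R := by
        rw [hmemR p, hpermP.count_eq, hpermC.count_eq]
        simp [h]
      simp [this, h]
  rw [find?_congr_mem _ _ _ hpred]

-- ===== VERDICT (by name: the statement is the Claim_ definition above) =====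
theorem solution_spec : Claim_equal_solution := by
  intro participant completion _ hpre
  obtain ⟨hsub, -⟩ := hpre
  show solution participant completion = solution_alt participant completion
  rw [solution_eq_find participant completion hsub,
    solution_alt_eq_find participant completion hsub]
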